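-- pv_equiv track=rewrite | github.com/EricMa24/OpenCV-Motion-Measure | src/TickMarkReader.py | group_by_distance
-- ===== SOURCE A (Python) =====
-- def group_by_distance(mask, threshold):
--     # group masks by distance
--     cur_group: List[int] = []
--     groups: List[type(cur_group)] = []
--     for el in filter(lambda el: el[1], enumerate(mask)):
--         pos = el[0]
--         if not cur_group:
--             cur_group.append(pos)
--         else:
--             if pos - cur_group[-1] <= threshold:  # same group if two point is within distance threshold
--                 cur_group.append(pos)
--             else:  # next group
--                 groups.append(cur_group)
--                 cur_group = [pos, ]
--     groups.append(cur_group)  # last group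
--     return groups
-- ===== SOURCE B (Python) =====
-- def group_by_distance(mask, threshold):
--     positions = [i for i, v in enumerate(mask) if v]
--     groups = []
--     start = 0
--     for j in range(1, len(positions)):
--         if positions[j] - positions[j - 1] > threshold:
--             groups.append(positions[start:j])
--             start = j
--     groups.append(positions[start:])
--     return groups
-- ===== Notes on version B (the rewrite author's own statement) =====
-- stated objective: alternative
-- what changed: B first extracts the list of set-bit positions and then slices it at the gap indices where consecutive positions differ by more than threshold, instead of A's single pass over the mask maintaining a growing current-group accumulator.
import Mathlib
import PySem

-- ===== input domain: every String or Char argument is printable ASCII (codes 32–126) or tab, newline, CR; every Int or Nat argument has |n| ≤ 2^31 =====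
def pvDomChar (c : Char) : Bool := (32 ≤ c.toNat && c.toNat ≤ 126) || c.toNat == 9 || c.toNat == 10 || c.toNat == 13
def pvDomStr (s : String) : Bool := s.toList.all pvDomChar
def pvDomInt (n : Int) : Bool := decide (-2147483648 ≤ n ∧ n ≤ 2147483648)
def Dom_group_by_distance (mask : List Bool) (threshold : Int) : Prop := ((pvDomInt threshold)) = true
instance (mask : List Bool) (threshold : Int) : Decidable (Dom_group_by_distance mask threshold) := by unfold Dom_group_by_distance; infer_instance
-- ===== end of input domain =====

-- B extracts the set-bit positions first and then slices that list at the large-gap indices,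
-- instead of A's single pass maintaining a current-group accumulator; same cost, different decomposition.


-- ===== PORT A =====
-- literal port of A: fold over filter(lambda el: el[1], enumerate(mask)) with state (cur_group, groups);
-- cur_group[-1] is pyGetD at -1 (the branch guarantees cur_group is nonempty, so Python never raises here)
def group_by_distance (mask : List Bool) (threshold : Int) : List (List Int) :=
  let st := ((PySem.List.enumerate mask 0).filter (fun el => el.2)).foldl
    (fun (st : List Int × List (List Int)) el =>
      let pos := el.1
      if st.1 = [] then (st.1 ++ [pos], st.2)
      else if pos - PySem.List.pyGetD st.1 (-1) 0 ≤ threshold then (st.1 ++ [pos], st.2)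
      else ([pos], st.2 ++ [st.1]))
    ([], [])
  st.2 ++ [st.1]

-- ===== PORT B =====
-- literal port of Source B: positions list, then an index loop over range(1, len(positions))
-- with state (groups, start), appending slices at the split boundaries
def group_by_distance_alt (mask : List Bool) (threshold : Int) : List (List Int) :=
  let positions : List Int := ((PySem.List.enumerate mask 0).filter (fun el => el.2)).map (fun el => el.1)
  let st := (PySem.List.pyRange 1 (positions.length : Int) 1).foldl
    (fun (st : List (List Int) × Int) j =>
      if threshold < PySem.List.pyGetD positions j 0 - PySem.List.pyGetD positions (j - 1) 0
      then (st.1 ++ [PySem.List.slice positions (some st.2) (some j)], j)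
      else st)
    ([], 0)
  st.1 ++ [PySem.List.slice positions (some st.2) none]

-- ===== PRECONDITION & SPEC =====
def Spec_group_by_distance (mask : List Bool) (threshold : Int) (out : List (List Int)) : Prop := out = group_by_distance_alt mask threshold
instance (mask : List Bool) (threshold : Int) (out : List (List Int)) : Decidable (Spec_group_by_distance mask threshold out) := by unfold Spec_group_by_distance; infer_instance

-- ===== CLAIM (what is proved, stated in full; the proofs are below) =====
def Claim_equal_group_by_distance : Prop := ∀ (mask : List Bool) (threshold : Int), Dom_group_by_distance mask threshold → Spec_group_by_distance mask threshold (group_by_distance mask threshold)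

-- ===== LEMMAS AND PROOFS =====

-- A's loop step, on the positions only (A's lambda reads only el.1 after the filter)
def gbdStepA (t : Int) (st : List Int × List (List Int)) (pos : Int) : List Int × List (List Int) :=
  if st.1 = [] then (st.1 ++ [pos], st.2)
  else if pos - PySem.List.pyGetD st.1 (-1) 0 ≤ t then (st.1 ++ [pos], st.2)
  else ([pos], st.2 ++ [st.1])

-- B's loop step over an index j, parametrised by the positions list it slices
def gbdStepB (t : Int) (P : List Int) (st : List (List Int) × Int) (j : Int) : List (List Int) × Int :=
  if t < PySem.List.pyGetD P j 0 - PySem.List.pyGetD P (j - 1) 0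
  then (st.1 ++ [PySem.List.slice P (some st.2) (some j)], j)
  else st

-- fold congruence carrying a state invariant (needed because B's step slices with the state's start index)
theorem gbd_foldl_congr_inv {a s : Type} (Inv : s -> Prop) (f g : s -> a -> s) (l : List a) (init : s)
    (hs : Inv init) (h : forall st x, Inv st -> x ∈ l -> f st x = g st x ∧ Inv (f st x)) :
    l.foldl f init = l.foldl g init ∧ Inv (l.foldl f init) := by
  induction l generalizing init with
  | nil => exact ⟨rfl, hs⟩
  | cons x xs ih =>
    obtain ⟨he, hi⟩ := h init x hs (List.mem_cons_self)
    simpa [List.foldl_cons, he] using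
      ih (g init x) (he ▸ hi) (fun st y hst hy => h st y hst (List.mem_cons_of_mem _ hy))

theorem gbd_pyGetD_append (P : List Int) (p : Int) (j : Int) (h0 : 0 ≤ j) (h1 : j < (P.length : Int)) :
    PySem.List.pyGetD (P ++ [p]) j 0 = PySem.List.pyGetD P j 0 := by
  rw [PySem.List.pyGetD_eq_getElem _ _ h0 (by simp; omega),
      PySem.List.pyGetD_eq_getElem _ _ h0 (by exact_mod_cast h1)]
  exact List.getElem_append_left (by omega)

theorem gbd_slice_append (P : List Int) (p : Int) (s j : Int)
    (hs : 0 ≤ s) (hsn : s ≤ (P.length : Int)) (hj : 0 ≤ j) (hjn : j ≤ (P.length : Int)) :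
    PySem.List.slice (P ++ [p]) (some s) (some j) = PySem.List.slice P (some s) (some j) := by
  rw [PySem.List.slice_toNat _ hs hj, PySem.List.slice_toNat _ hs hj,
      List.drop_append_of_le_length (by omega)]
  exact List.take_append_of_le_length (by simp; omega)

-- p appended at the end of the positions list is read back by B at index len(P)
theorem gbd_pyGetD_last (P : List Int) (p : Int) :
    PySem.List.pyGetD (P ++ [p]) (P.length : Int) 0 = p := by
  simp [List.getD_eq_getElem?_getD]

theorem gbd_pyGetD_prev (P : List Int) (p : Int) (hP : P ≠ []) :
    PySem.List.pyGetD (P ++ [p]) ((P.length : Int) - 1) 0 = P.getLast hP := by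
  have h1 : 1 ≤ P.length := List.length_pos_iff.mpr hP
  have hcast : ((P.length : Int) - 1) = ((P.length - 1 : Nat) : Int) := by omega
  rw [hcast, PySem.List.pyGetD_natCast, List.getD_eq_getElem?_getD,
      List.getElem?_append_left (by omega), List.getLast_eq_getElem]
  simp [List.getElem?_eq_getElem (by omega : P.length - 1 < P.length)]

-- the joint loop invariant, by induction on the positions list from the right
theorem gbd_main (t : Int) (P : List Int) :
    ((PySem.List.pyRange 1 (P.length : Int) 1).foldl (gbdStepB t P) ([], 0)).1
      = (P.foldl (gbdStepA t) ([], [])).2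
    ∧ 0 ≤ ((PySem.List.pyRange 1 (P.length : Int) 1).foldl (gbdStepB t P) ([], 0)).2
    ∧ ((PySem.List.pyRange 1 (P.length : Int) 1).foldl (gbdStepB t P) ([], 0)).2 ≤ (P.length : Int)
    ∧ P.drop ((PySem.List.pyRange 1 (P.length : Int) 1).foldl (gbdStepB t P) ([], 0)).2.toNat
      = (P.foldl (gbdStepA t) ([], [])).1
    ∧ (P ≠ [] → ((PySem.List.pyRange 1 (P.length : Int) 1).foldl (gbdStepB t P) ([], 0)).2 < (P.length : Int)) := by
  induction P using List.reverseRecOn with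
  | nil => simp [PySem.List.pyRange_one_eq_nil]
  | append_singleton P p ih =>
    by_cases hP : P = []
    · subst hP
      simp [gbdStepA, PySem.List.pyRange_one_eq_nil]
    · have hpos : 0 < P.length := List.length_pos_iff.mpr hP
      have hlen : ((P ++ [p]).length : Int) = (P.length : Int) + 1 := by simp
      rw [hlen, PySem.List.pyRange_one_succ_right (by omega), List.foldl_append, List.foldl_append]
      obtain ⟨hcong, -⟩ := gbd_foldl_congr_inv
        (fun st : List (List Int) × Int => 0 ≤ st.2 ∧ st.2 ≤ (P.length : Int))
        (gbdStepB t (P ++ [p])) (gbdStepB t P) (PySem.List.pyRange 1 (P.length : Int) 1) ([], 0)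
        ⟨le_refl 0, by simp⟩
        (by
          intro st j hst hj
          rw [PySem.List.mem_pyRange_one] at hj
          have hstep : gbdStepB t (P ++ [p]) st j = gbdStepB t P st j := by
            unfold gbdStepB
            rw [gbd_pyGetD_append P p j (by omega) (by omega),
                gbd_pyGetD_append P p (j - 1) (by omega) (by omega),
                gbd_slice_append P p st.2 j hst.1 hst.2 (by omega) (by omega)]
          refine ⟨hstep, ?_⟩
          rw [hstep]; unfold gbdStepB
          split
          · exact ⟨by omega, by omega⟩
          · exact hst)
      rw [hcong]
      obtain ⟨h1, h2, h3, h4, h5⟩ := ih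
      have h5' := h5 hP
      set B := (PySem.List.pyRange 1 (P.length : Int) 1).foldl (gbdStepB t P) ([], 0) with hB
      set A := P.foldl (gbdStepA t) ([], []) with hA
      have hdropne : P.drop B.2.toNat ≠ [] := by
        simp only [ne_eq, List.drop_eq_nil_iff]; omega
      have hA1ne : A.1 ≠ [] := h4 ▸ hdropne
      have hlastA : PySem.List.pyGetD A.1 (-1) 0 = P.getLast hP := by
        rw [← h4, PySem.List.pyGetD_neg_one _ _ hdropne]
        exact List.getLast_drop hdropne
      simp only [List.foldl_cons, List.foldl_nil]
      unfold gbdStepB gbdStepA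
      rw [gbd_pyGetD_last, gbd_pyGetD_prev P p hP, hlastA, if_neg hA1ne]
      by_cases hgap : t < p - P.getLast hP
      · rw [if_pos hgap, if_neg (by omega)]
        have hslice : PySem.List.slice (P ++ [p]) (some B.2) (some (P.length : Int)) = A.1 := by
          rw [gbd_slice_append P p B.2 _ h2 h3 (by simp) (le_refl _),
              PySem.List.slice_toNat _ h2 (by simp),
              List.take_of_length_le (by simp), h4]
        refine ⟨by rw [hslice, h1], by simp, by omega, ?_, fun _ => by omega⟩
        simp
      · rw [if_neg hgap, if_pos (by omega)]
        refine ⟨h1, h2, by omega, ?_, fun _ => by omega⟩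
        rw [List.drop_append_of_le_length (by omega), h4]

-- ===== VERDICT (by name: the statement is the Claim_ definition above) =====
theorem group_by_distance_spec : Claim_equal_group_by_distance := by
  intro mask t _
  unfold Spec_group_by_distance group_by_distance group_by_distance_alt
  set P : List Int := ((PySem.List.enumerate mask 0).filter (fun el => el.2)).map (fun el => el.1) with hPdef
  have hfoldA : ((PySem.List.enumerate mask 0).filter (fun el => el.2)).foldl
      (fun (st : List Int × List (List Int)) el =>
        let pos := el.1
        if st.1 = [] then (st.1 ++ [pos], st.2)
        else if pos - PySem.List.pyGetD st.1 (-1) 0 ≤ t then (st.1 ++ [pos], st.2)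
        else ([pos], st.2 ++ [st.1])) ([], [])
      = P.foldl (gbdStepA t) ([], []) := by
    rw [hPdef, List.foldl_map]; rfl
  obtain ⟨h1, h2, -, h4, -⟩ := gbd_main t P
  simp only [hfoldA]
  refine Eq.symm ?_
  show ((PySem.List.pyRange 1 (P.length : Int) 1).foldl (gbdStepB t P) ([], 0)).1
      ++ [PySem.List.slice P (some ((PySem.List.pyRange 1 (P.length : Int) 1).foldl (gbdStepB t P) ([], 0)).2) none]
      = (P.foldl (gbdStepA t) ([], [])).2 ++ [(P.foldl (gbdStepA t) ([], [])).1]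
  rw [PySem.List.slice_from _ h2, h4, h1]
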